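-- pv_equiv track=rewrite | github.com/vignesh-viswanathan/Bayesian-Stackelberg-Games | MultipleLPs.py | generatePureStrategyMLP
-- ===== SOURCE A (Python) =====
-- def generatePureStrategyMLP(AttackerRF):
--     purestrategylist = []
--     typecounter = [0]*len(AttackerRF)
--     limit = len(AttackerRF[0][0])
--     while(typecounter[0]!=limit):
--
--         purestrategy = []
--         for i in range(0,len(AttackerRF)):
--             strategy = [0]*limit
--             strategy[typecounter[i]]=1
--             purestrategy.append(strategy)
--         purestrategylist.append(purestrategy)
--         typecounter[len(AttackerRF)-1]+=1
--         for i in range(-len(AttackerRF)+1,0):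
--             ind = -i
--             if(typecounter[ind]==limit):
--                 typecounter[ind]=0
--                 typecounter[ind-1]+=1
--     return purestrategylist
-- ===== SOURCE B (Python) =====
-- def generatePureStrategyMLP(AttackerRF):
--     limit = len(AttackerRF[0][0])
--     n = len(AttackerRF)
--
--     def onehot(idx):
--         strategy = [0] * limit
--         strategy[idx] = 1
--         return strategy
--
--     def rec(remaining):
--         if remaining == 0:
--             return [[]]
--         tails = rec(remaining - 1)
--         return [[onehot(idx)] + t for idx in range(limit) for t in tails]
--
--     return rec(n)
-- ===== Notes on version B (the rewrite author's own statement) =====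
-- stated objective: alternative
-- what changed: Replaced the while-loop with a mutable multi-digit counter and explicit ripple-carry by a recursion over the number of attacker types that builds the Cartesian product of one-hot vectors directly (last type varying fastest).
import Mathlib
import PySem

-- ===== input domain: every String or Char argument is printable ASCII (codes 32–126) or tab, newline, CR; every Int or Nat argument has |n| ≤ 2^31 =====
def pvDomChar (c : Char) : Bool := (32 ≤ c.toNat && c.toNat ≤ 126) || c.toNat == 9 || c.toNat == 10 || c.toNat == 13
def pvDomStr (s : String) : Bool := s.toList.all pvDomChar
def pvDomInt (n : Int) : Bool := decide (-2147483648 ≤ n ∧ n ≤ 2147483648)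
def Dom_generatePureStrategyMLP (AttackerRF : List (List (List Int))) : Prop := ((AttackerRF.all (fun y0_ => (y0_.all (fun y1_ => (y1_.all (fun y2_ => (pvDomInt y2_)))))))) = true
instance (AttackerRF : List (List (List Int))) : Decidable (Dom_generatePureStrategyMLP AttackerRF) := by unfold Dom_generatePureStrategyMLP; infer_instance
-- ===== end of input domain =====

-- B replaces A's mutable counter + ripple-carry while-loop by a recursion over the number of
-- attacker types building the Cartesian product of one-hot vectors directly (same list, same
-- order); return values are proved equal (B's output may share inner list objects in Python).

-- ===== PORT A =====
-- one pass of the inner carry loop body: ind = -i; if tc[ind]==limit: tc[ind]=0; tc[ind-1]+=1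
-- (indices are always in range on the executed states, so getD/set are exact here)
def pvCarryF (limit : Nat) (t : List Nat) (i : Int) : List Nat :=
  let ind := (-i).toNat
  if t.getD ind 0 = limit then
    let t2 := t.set ind 0
    t2.set (ind - 1) (t2.getD (ind - 1) 0 + 1)
  else t

-- typecounter[n-1] += 1 followed by 'for i in range(-n+1, 0): ...'
def pvStep (limit n : Nat) (tc : List Nat) : List Nat :=
  let tc1 := tc.set (n - 1) (tc.getD (n - 1) 0 + 1)
  (PySem.List.pyRange (1 - (n : Int)) 0 1).foldl (pvCarryF limit) tc1

-- the inner 'for i in range(0, len(AttackerRF)): strategy = [0]*limit; strategy[tc[i]] = 1; append'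
def pvMkPure (limit n : Nat) (tc : List Nat) : List (List Int) :=
  (List.range n).map (fun i => (List.replicate limit (0 : Int)).set (tc.getD i 0) 1)

-- the while loop; fuel (limit^n + 1 iterations always suffice) only makes it total
def pvLoopA (limit n : Nat) : Nat → List Nat → List (List (List Int)) → List (List (List Int))
  | 0, _, acc => acc
  | fuel + 1, tc, acc =>
    if tc.getD 0 0 = limit then acc
    else pvLoopA limit n fuel (pvStep limit n tc) (acc ++ [pvMkPure limit n tc])

def generatePureStrategyMLP (AttackerRF : List (List (List Int))) : List (List (List Int)) :=
  let n := AttackerRF.length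
  let limit := ((AttackerRF.headD []).headD []).length
  pvLoopA limit n (limit ^ n + 1) (List.replicate n 0) []

-- ===== PORT B =====
-- onehot(idx): strategy = [0]*limit; strategy[idx] = 1
def pvOnehot (limit idx : Nat) : List Int := (List.replicate limit (0 : Int)).set idx 1

-- rec(remaining): base [[]]; else [[onehot(idx)] + t for idx in range(limit) for t in tails]
def pvRecB (limit : Nat) : Nat → List (List (List Int))
  | 0 => [[]]
  | m + 1 =>
    (List.range limit).flatMap (fun idx => (pvRecB limit m).map (fun t => pvOnehot limit idx :: t))

def generatePureStrategyMLP_alt (AttackerRF : List (List (List Int))) : List (List (List Int)) :=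
  let limit := ((AttackerRF.headD []).headD []).length
  let n := AttackerRF.length
  pvRecB limit n

-- ===== PRECONDITION & SPEC =====
-- Pre_ excludes exactly the inputs where Python A raises IndexError at AttackerRF[0][0]
-- (empty outer list, or empty first row); B raises there too.
def Pre_generatePureStrategyMLP (AttackerRF : List (List (List Int))) : Prop :=
  AttackerRF ≠ [] ∧ AttackerRF.headD [] ≠ []
instance (AttackerRF : List (List (List Int))) : Decidable (Pre_generatePureStrategyMLP AttackerRF) := by
  unfold Pre_generatePureStrategyMLP; infer_instance

def pvWitness_generatePureStrategyMLP : List (List (List Int)) := [[[1, 2]], [[3, 4]]]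

def Spec_generatePureStrategyMLP (AttackerRF : List (List (List Int))) (out : List (List (List Int))) : Prop := out = generatePureStrategyMLP_alt AttackerRF
instance (AttackerRF : List (List (List Int))) (out : List (List (List Int))) : Decidable (Spec_generatePureStrategyMLP AttackerRF out) := by unfold Spec_generatePureStrategyMLP; infer_instance

-- ===== CLAIM (what is proved, stated in full; the proofs are below) =====
def Claim_equal_generatePureStrategyMLP : Prop := ∀ (AttackerRF : List (List (List Int))), Dom_generatePureStrategyMLP AttackerRF → Pre_generatePureStrategyMLP AttackerRF → Spec_generatePureStrategyMLP AttackerRF (generatePureStrategyMLP AttackerRF)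

-- ===== LEMMAS AND PROOFS =====

-- the counter states, LSB-first: top digit (last entry) is kept unreduced so it can reach `limit`
def pvEncodeR (L : Nat) : Nat → Nat → List Nat
  | 0, _ => []
  | 1, v => [v]
  | n + 2, v => v % L :: pvEncodeR L (n + 1) (v / L)

-- the counter as A stores it (MSB first)
def pvEncode (L n v : Nat) : List Nat := (pvEncodeR L n v).reverse

theorem pvEncodeR_length (L : Nat) : ∀ n v, (pvEncodeR L n v).length = n := by
  intro n
  induction n with
  | zero => intro v; rfl
  | succ m ih =>
    intro v
    match m with
    | 0 => rfl
    | m + 1 => simp [pvEncodeR, ih]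

theorem pvEncode_length (L n v : Nat) : (pvEncode L n v).length = n := by
  simp [pvEncode, pvEncodeR_length]

theorem pvEncodeR_zero (L : Nat) : ∀ n, pvEncodeR L n 0 = List.replicate n 0 := by
  intro n
  induction n with
  | zero => rfl
  | succ m ih =>
    match m with
    | 0 => rfl
    | m + 1 => simp [pvEncodeR, Nat.zero_mod, Nat.zero_div, ih, List.replicate_succ]

theorem pvEncode_zero (L n : Nat) : pvEncode L n 0 = List.replicate n 0 := by
  simp [pvEncode, pvEncodeR_zero, List.reverse_replicate]

theorem pvEncodeR_lt (L : Nat) : ∀ n v, v < L ^ n → ∀ d ∈ pvEncodeR L n v, d < L := by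
  intro n
  induction n with
  | zero => intro v _ d hd; simp [pvEncodeR] at hd
  | succ m ih =>
    intro v hv d hd
    have hL : 0 < L := by
      by_contra h
      have : L = 0 := by omega
      subst this
      simp at hv
    match m with
    | 0 =>
      simp [pvEncodeR] at hd
      simpa [hd, pow_one] using hv
    | m + 1 =>
      simp only [pvEncodeR, List.mem_cons] at hd
      rcases hd with h | h
      · exact h ▸ Nat.mod_lt _ hL
      · exact ih (v / L) (Nat.div_lt_of_lt_mul (by rwa [← pow_succ'])) d h

-- MSB decomposition: encode (n+1) v = v / L^n :: encode n (v % L^n)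
theorem pvEncodeR_msb (L : Nat) : ∀ n v, pvEncodeR L (n + 1) v = pvEncodeR L n (v % L ^ n) ++ [v / L ^ n] := by
  intro n
  induction n with
  | zero => intro v; simp [pvEncodeR]
  | succ m ih =>
    intro v
    match m with
    | 0 =>
      simp [pvEncodeR, pow_one]
    | m + 1 =>
      have h1 : v % L ^ (m + 2) % L = v % L := Nat.mod_mod_of_dvd v (dvd_pow_self L (by omega))
      have h2 : v % L ^ (m + 2) / L = v / L % L ^ (m + 1) := by
        rw [pow_succ', Nat.mod_mul_right_div_self]
      have h3 : v / L / L ^ (m + 1) = v / L ^ (m + 2) := by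
        rw [Nat.div_div_eq_div_mul, ← pow_succ']
      calc pvEncodeR L (m + 1 + 1 + 1) v = v % L :: pvEncodeR L (m + 1 + 1) (v / L) := rfl
        _ = v % L :: (pvEncodeR L (m + 1) (v / L % L ^ (m + 1)) ++ [v / L / L ^ (m + 1)]) := by
              rw [ih]
        _ = pvEncodeR L (m + 1 + 1) (v % L ^ (m + 1 + 1)) ++ [v / L ^ (m + 1 + 1)] := by
              rw [show pvEncodeR L (m + 1 + 1) (v % L ^ (m + 1 + 1)) =
                    v % L ^ (m + 2) % L :: pvEncodeR L (m + 1) (v % L ^ (m + 2) / L) from rfl,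
                  h1, h2, h3]
              simp

theorem pvEncode_msb (L n v : Nat) : pvEncode L (n + 1) v = v / L ^ n :: pvEncode L n (v % L ^ n) := by
  simp [pvEncode, pvEncodeR_msb]

-- tail (LSB) decomposition for n ≥ 1
theorem pvEncode_snoc (L n v : Nat) : pvEncode L (n + 2) v = pvEncode L (n + 1) (v / L) ++ [v % L] := by
  simp [pvEncode, pvEncodeR]

-- the carry fold does nothing when every scanned digit differs from limit
theorem pvCarry_noop (L : Nat) : ∀ (inds : List Int) (t : List Nat),
    (∀ i ∈ inds, t.getD (-i).toNat 0 ≠ L) → inds.foldl (pvCarryF L) t = t := by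
  intro inds
  induction inds with
  | nil => intro t _; rfl
  | cons i rest ih =>
    intro t h
    have h1 : pvCarryF L t i = t := by
      simp only [pvCarryF, if_neg (h i (List.mem_cons_self ..))]
    simp only [List.foldl_cons, h1]
    exact ih t (fun j hj => h j (List.mem_cons_of_mem _ hj))

-- the carry fold ignores an appended last element when all scanned indices stay inside the prefix
theorem pvCarry_append (L : Nat) : ∀ (inds : List Int) (t : List Nat) (x : Nat),
    (∀ i ∈ inds, 0 < (-i).toNat ∧ (-i).toNat < t.length) →
    inds.foldl (pvCarryF L) (t ++ [x]) = inds.foldl (pvCarryF L) t ++ [x] := by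
  intro inds
  induction inds with
  | nil => intro t x _; rfl
  | cons i rest ih =>
    intro t x h
    obtain ⟨hpos, hlt⟩ := h i (List.mem_cons_self ..)
    have hget : (t ++ [x]).getD (-i).toNat 0 = t.getD (-i).toNat 0 := by
      simp [List.getD_eq_getElem?_getD, List.getElem?_append_left hlt]
    have hstep : pvCarryF L (t ++ [x]) i = pvCarryF L t i ++ [x] := by
      simp only [pvCarryF, hget]
      split_ifs with hc
      · have hlt1 : (-i).toNat - 1 < t.length := by omega
        have hset : (t ++ [x]).set (-i).toNat 0 = t.set (-i).toNat 0 ++ [x] :=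
          List.set_append_left _ _ hlt
        rw [hset]
        have hget2 : (t.set (-i).toNat 0 ++ [x]).getD ((-i).toNat - 1) 0 =
            (t.set (-i).toNat 0).getD ((-i).toNat - 1) 0 := by
          simp only [List.getD_eq_getElem?_getD]
          rw [List.getElem?_append_left (by simpa using hlt1)]
        rw [hget2, List.set_append_left _ _ (by simpa using hlt1)]
      · rfl
    have hlen : (pvCarryF L t i).length = t.length := by
      simp only [pvCarryF]
      split_ifs <;> simp
    simp only [List.foldl_cons, hstep]
    exact ih (pvCarryF L t i) x (fun j hj => by
      obtain ⟨h1, h2⟩ := h j (List.mem_cons_of_mem _ hj)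
      exact ⟨h1, by omega⟩)

-- the step is exactly +1 on the encoded counter
theorem pvGetD_append_length (t : List Nat) (x : Nat) : (t ++ [x]).getD t.length 0 = x := by
  simp [List.getD_eq_getElem?_getD]

theorem pvSet_append_length (t : List Nat) (x y : Nat) : (t ++ [x]).set t.length y = t ++ [y] := by
  rw [List.set_append_right _ _ (Nat.le_refl _)]
  simp

theorem pvGetD_append_left (t : List Nat) (x : Nat) (i : Nat) (h : i < t.length) :
    (t ++ [x]).getD i 0 = t.getD i 0 := by
  simp only [List.getD_eq_getElem?_getD]
  rw [List.getElem?_append_left h]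

theorem pvEncode_getD_lt (L n v : Nat) (hv : v < L ^ n) (i : Nat) (hi : i < n) :
    (pvEncode L n v).getD i 0 < L := by
  have hlen : (pvEncode L n v).length = n := pvEncode_length ..
  rw [List.getD_eq_getElem _ _ (by omega)]
  exact pvEncodeR_lt L n v hv _ (List.mem_reverse.mp (List.getElem_mem _))

theorem pvStep_encode (L : Nat) : ∀ n v, v < L ^ (n + 1) →
    pvStep L (n + 1) (pvEncode L (n + 1) v) = pvEncode L (n + 1) (v + 1) := by
  intro n
  induction n with
  | zero =>
    intro v hv
    have h1 : pvEncode L 1 v = [v] := rfl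
    have h2 : pvEncode L 1 (v + 1) = [v + 1] := rfl
    rw [pvStep, h1, h2]
    have hr : PySem.List.pyRange (1 - ((1 : Nat) : Int)) 0 1 = [] := by
      rw [show (1 - ((1 : Nat) : Int)) = 0 by norm_num]
      exact PySem.List.pyRange_one_eq_nil (by norm_num)
    rw [hr]
    rfl
  | succ m ih =>
    intro v hv
    have hL : 0 < L := by
      by_contra h
      have : L = 0 := by omega
      subst this
      simp at hv
    have hpow : 0 < L ^ (m + 1) := pow_pos hL _
    have hdivlt : v / L < L ^ (m + 1) := Nat.div_lt_of_lt_mul (by rwa [← pow_succ'])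
    have hPlen : (pvEncode L (m + 1) (v / L)).length = m + 1 := pvEncode_length ..
    set P := pvEncode L (m + 1) (v / L) with hPdef
    have hsnoc : pvEncode L (m + 1 + 1) v = P ++ [v % L] := pvEncode_snoc ..
    -- the counter index n-1 of the outer step is P.length
    have hidx : m + 1 + 1 - 1 = P.length := by omega
    have hrange : PySem.List.pyRange (1 - ((m + 1 + 1 : Nat) : Int)) 0 1
        = (-((m : Int) + 1)) :: PySem.List.pyRange (1 - ((m + 1 : Nat) : Int)) 0 1 := by
      have e1 : (1 - ((m + 1 + 1 : Nat) : Int)) = -((m : Int) + 1) := by push_cast; ring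
      have e2 : (-((m : Int) + 1)) + 1 = 1 - ((m + 1 : Nat) : Int) := by push_cast; ring
      rw [e1, PySem.List.pyRange_one_cons (by omega), e2]
    have hinds : ∀ i ∈ PySem.List.pyRange (1 - ((m + 1 : Nat) : Int)) 0 1,
        0 < (-i).toNat ∧ (-i).toNat < m + 1 := by
      intro i hi
      rw [PySem.List.mem_pyRange_one] at hi
      omega
    rw [pvStep, hsnoc, hidx, pvGetD_append_length, pvSet_append_length, hrange, List.foldl_cons]
    have hmodlt : v % L < L := Nat.mod_lt _ hL
    have hindN : (-(-((m : Int) + 1))).toNat = m + 1 := by omega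
    by_cases hc : v % L + 1 = L
    · -- carry out of the last digit
      have hstep1 : pvCarryF L (P ++ [v % L + 1]) (-((m : Int) + 1))
          = P.set m (P.getD m 0 + 1) ++ [0] := by
        rw [pvCarryF]
        simp only [hindN]
        rw [if_pos (by rw [← hPlen] at *; rw [pvGetD_append_length]; exact hc)]
        rw [show (P ++ [v % L + 1]).set (m + 1) 0 = P ++ [0] by
          rw [← hPlen]; exact pvSet_append_length ..]
        rw [show m + 1 - 1 = m by omega]
        rw [pvGetD_append_left _ _ _ (by omega), List.set_append_left _ _ (by omega)]
      rw [hstep1, pvCarry_append _ _ _ _ (by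
        intro i hi
        have := hinds i hi
        simp only [List.length_set]
        omega)]
      have hih : List.foldl (pvCarryF L) (P.set m (P.getD m 0 + 1))
          (PySem.List.pyRange (1 - ((m + 1 : Nat) : Int)) 0 1) = pvEncode L (m + 1) (v / L + 1) := by
        have := ih (v / L) hdivlt
        rw [pvStep] at this
        rw [show m + 1 - 1 = m by omega] at this
        exact this
      rw [hih]
      -- arithmetic: v+1 = (v/L + 1) * L
      have hva : v + 1 = L * (v / L + 1) := by
        have h6 := Nat.div_add_mod v L
        rw [Nat.mul_add, Nat.mul_one]
        omega
      have hdiv1 : (v + 1) / L = v / L + 1 := by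
        rw [hva, Nat.mul_div_cancel_left _ hL]
      have hmod1 : (v + 1) % L = 0 := by
        rw [hva, Nat.mul_mod_right]
      rw [pvEncode_snoc, hdiv1, hmod1]
    · -- no carry
      have hstep1 : pvCarryF L (P ++ [v % L + 1]) (-((m : Int) + 1)) = P ++ [v % L + 1] := by
        rw [pvCarryF]
        simp only [hindN]
        rw [if_neg (by rw [← hPlen] at *; rw [pvGetD_append_length]; exact hc)]
      rw [hstep1, pvCarry_append _ _ _ _ (by
        intro i hi
        have := hinds i hi
        omega)]
      rw [pvCarry_noop _ _ _ (by
        intro i hi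
        have h1 := hinds i hi
        have h2 : P.getD (-i).toNat 0 < L := pvEncode_getD_lt L (m + 1) (v / L) hdivlt _ (by omega)
        omega)]
      have hlt : v % L + 1 < L := by omega
      have hva : v + 1 = (v % L + 1) + L * (v / L) := by
        have := Nat.div_add_mod v L
        omega
      have hdiv1 : (v + 1) / L = v / L := by
        rw [hva, Nat.add_mul_div_left _ _ hL, Nat.div_eq_of_lt hlt, Nat.zero_add]
      have hmod1 : (v + 1) % L = v % L + 1 := by
        rw [hva, Nat.add_mul_mod_self_left, Nat.mod_eq_of_lt hlt]
      rw [pvEncode_snoc, hdiv1, hmod1]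

-- exit test of the while loop
theorem pvExit (L n v : Nat) (hv : v ≤ L ^ (n + 1)) :
    ((pvEncode L (n + 1) v).getD 0 0 = L) ↔ v = L ^ (n + 1) := by
  rw [pvEncode_msb, List.getD_cons_zero]
  rcases Nat.eq_zero_or_pos L with hL | hL
  · subst hL
    have hv0 : v = 0 := by simpa using hv
    subst hv0
    simp
  · have hpow : 0 < L ^ n := pow_pos hL n
    constructor
    · intro h
      have h2 : L * L ^ n ≤ v := by
        have := (Nat.le_div_iff_mul_le hpow).mp (le_of_eq h.symm)
        omega
      have h3 : L ^ (n + 1) = L * L ^ n := pow_succ' ..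
      omega
    · intro h
      subst h
      rw [pow_succ, Nat.mul_div_cancel_left _ hpow]

theorem pvLoopA_spec (L n : Nat) : ∀ (fuel v : Nat) (acc : List (List (List Int))),
    v ≤ L ^ (n + 1) → L ^ (n + 1) - v < fuel →
    pvLoopA L (n + 1) fuel (pvEncode L (n + 1) v) acc =
      acc ++ (List.range' v (L ^ (n + 1) - v)).map (fun w => pvMkPure L (n + 1) (pvEncode L (n + 1) w)) := by
  intro fuel
  induction fuel with
  | zero => intro v acc _ hf; omega
  | succ fuel ih =>
    intro v acc hv hf
    rw [pvLoopA]
    by_cases hend : v = L ^ (n + 1)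
    · rw [if_pos ((pvExit L n v hv).mpr hend)]
      simp [hend]
    · have hvlt : v < L ^ (n + 1) := by omega
      rw [if_neg (fun h => hend ((pvExit L n v hv).mp h))]
      rw [pvStep_encode L n v hvlt]
      rw [ih (v + 1) _ (by omega) (by omega)]
      have hrr : List.range' v (L ^ (n + 1) - v) = v :: List.range' (v + 1) (L ^ (n + 1) - (v + 1)) := by
        rw [show L ^ (n + 1) - v = (L ^ (n + 1) - (v + 1)) + 1 by omega, List.range'_succ]
      rw [hrr]
      simp

theorem pvMkPure_map (L m : Nat) (tc : List Nat) (h : tc.length = m) :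
    pvMkPure L m tc = tc.map (pvOnehot L) := by
  apply List.ext_getElem
  · simp [pvMkPure, h]
  · intro i h1 h2
    simp only [pvMkPure, List.getElem_map, List.getElem_range]
    rw [List.getD_eq_getElem _ _ (by simp [pvMkPure] at h1; omega)]
    rfl

theorem pvRangeMul : ∀ a b : Nat, List.range (a * b) = (List.range a).flatMap (fun i => (List.range b).map (fun j => i * b + j)) := by
  intro a b
  induction a with
  | zero => simp
  | succ a ih =>
    rw [List.range_succ, List.flatMap_append, ← ih, Nat.succ_mul, List.range_add]
    simp [Nat.add_comm]

theorem pvRecB_eq (L : Nat) : ∀ m, pvRecB L m = (List.range (L ^ m)).map (fun v => (pvEncode L m v).map (pvOnehot L)) := by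
  intro m
  induction m with
  | zero =>
    simp [pvRecB, pvEncode, pvEncodeR, List.range_one]
  | succ m ih =>
    rcases Nat.eq_zero_or_pos L with hL | hL
    · subst hL
      simp [pvRecB]
    · have hpow : 0 < L ^ m := pow_pos hL m
      rw [pvRecB, ih, show L ^ (m + 1) = L * L ^ m from pow_succ' .., pvRangeMul,
        List.map_flatMap]
      apply List.flatMap_congr
      intro i hi
      rw [List.map_map, List.map_map]
      apply List.map_congr_left
      intro j hj
      have hjlt : j < L ^ m := List.mem_range.mp hj
      have hdiv : (i * L ^ m + j) / L ^ m = i := by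
        rw [Nat.add_comm, Nat.mul_comm, Nat.add_mul_div_left _ _ hpow,
          Nat.div_eq_of_lt hjlt, Nat.zero_add]
      have hmod : (i * L ^ m + j) % L ^ m = j := by
        rw [Nat.add_comm, Nat.mul_comm, Nat.add_mul_mod_self_left, Nat.mod_eq_of_lt hjlt]
      simp only [Function.comp_apply]
      rw [pvEncode_msb, hdiv, hmod]
      rfl

-- ===== VERDICT (by name: the statement is the Claim_ definition above) =====
theorem generatePureStrategyMLP_spec : Claim_equal_generatePureStrategyMLP := by
  intro RF _ hpre
  obtain ⟨hne, _⟩ := hpre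
  obtain ⟨r, rest, rfl⟩ := List.exists_cons_of_ne_nil hne
  unfold Spec_generatePureStrategyMLP generatePureStrategyMLP generatePureStrategyMLP_alt
  simp only [List.headD_cons, List.length_cons]
  set L := (r.headD []).length with hLdef
  set n := rest.length with hndef
  rw [← pvEncode_zero L (n + 1)]
  rw [pvLoopA_spec L n (L ^ (n + 1) + 1) 0 [] (Nat.zero_le _) (by omega)]
  rw [pvRecB_eq, List.range_eq_range', List.nil_append, Nat.sub_zero]
  apply List.map_congr_left
  intro w _
  exact pvMkPure_map L (n + 1) _ (pvEncode_length ..)
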